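-- pv_equiv track=rewrite | github.com/joelpmichael/netperf | libnetperf.py | skip_x2
-- ===== SOURCE A (Python) =====
-- def skip_x2(min,max):
--     # n^2 exponential skip
--
--     if min == max:
--         return [max]
--
--     range = []
--     if min == 1:
--         min = 0
--     else:
--         range.append(min)
--     i=1
--     while min + i <= max:
--         range.append(min + i)
--         i = i * 2
--
--     if min + i != max:
--         range.append(max)
--
--     return range
-- ===== SOURCE B (Python) =====
-- def skip_x2(min, max):
--     if min == max:
--         return [max]
--
--     def powers(d):
--         # recursive halving: the powers of two <= d, via powers(d) = 1 :: 2*powers(d//2)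
--         if d < 1:
--             return []
--         return [1] + [2 * p for p in powers(d // 2)]
--
--     m = 0 if min == 1 else min
--     head = [] if min == 1 else [min]
--     return head + [m + p for p in powers(max - m)] + [max]
-- ===== Notes on version B (the rewrite author's own statement) =====
-- stated objective: alternative
-- what changed: Replaces A's mutating doubling-accumulator while-loop (with its always-true final guard) by a top-down recursive halving decomposition: powers(d) = [1] + [2*p for p in powers(d//2)] generates the exponential steps, which are then offset and concatenated with the endpoints.
import Mathlib
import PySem

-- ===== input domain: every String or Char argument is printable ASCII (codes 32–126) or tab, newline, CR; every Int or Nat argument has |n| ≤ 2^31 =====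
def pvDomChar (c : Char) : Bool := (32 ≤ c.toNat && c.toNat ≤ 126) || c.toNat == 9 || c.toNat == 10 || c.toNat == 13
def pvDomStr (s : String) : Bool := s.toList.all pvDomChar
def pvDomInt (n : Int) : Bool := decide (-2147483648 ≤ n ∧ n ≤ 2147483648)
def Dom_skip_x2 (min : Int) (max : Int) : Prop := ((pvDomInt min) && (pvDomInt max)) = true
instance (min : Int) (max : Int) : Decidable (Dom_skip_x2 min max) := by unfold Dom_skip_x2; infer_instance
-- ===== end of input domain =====

-- B replaces A's mutating doubling while-loop accumulator by a top-down recursive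
-- halving decomposition (powers(d) = [1] + 2*powers(d//2)); objective: alternative.

-- ===== PORT A =====
-- the while loop `while min + i <= max: range.append(min + i); i = i * 2`,
-- returning (range, i) at loop exit; fuel is a totality guard only (i starts at 1 and
-- doubles, so (max - min).toNat + 1 steps always suffice; the fuel-exhausted branch
-- is never taken on the actual call)
def skip_x2_loop : Nat → Int → Int → Int → List Int → List Int × Int
  | 0, _, _, i, acc => (acc, i)
  | fuel + 1, min, max, i, acc =>
      if min + i ≤ max then skip_x2_loop fuel min max (i * 2) (acc ++ [min + i])
      else (acc, i)

def skip_x2 (min : Int) (max : Int) : List Int :=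
  if min = max then [max]
  else
    -- range = []; if min == 1: min = 0 else: range.append(min)
    let st := if min = 1 then ((0 : Int), ([] : List Int)) else (min, [min])
    let min' := st.1
    let r := st.2
    -- i = 1; while loop
    let res := skip_x2_loop ((max - min').toNat + 1) min' max 1 r
    -- if min + i != max: range.append(max)
    if min' + res.2 ≠ max then res.1 ++ [max] else res.1

-- ===== PORT B =====
-- `powers(d)`: if d < 1: []; else [1] + [2*p for p in powers(d//2)]
def powersB (d : Int) : List Int :=
  if _h : d < 1 then []
  else [1] ++ (powersB (PySem.Int.floordiv d 2)).map (fun p => 2 * p)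
termination_by d.toNat
decreasing_by
  rw [PySem.Int.floordiv_eq_ediv_of_pos (by omega : (0:Int) < 2)]
  omega

def skip_x2_alt (min : Int) (max : Int) : List Int :=
  if min = max then [max]
  else
    let m : Int := if min = 1 then 0 else min
    let head : List Int := if min = 1 then [] else [min]
    head ++ (powersB (max - m)).map (fun p => m + p) ++ [max]

-- ===== PRECONDITION & SPEC =====
def Spec_skip_x2 (min : Int) (max : Int) (out : List Int) : Prop := out = skip_x2_alt min max
instance (min : Int) (max : Int) (out : List Int) : Decidable (Spec_skip_x2 min max out) := by unfold Spec_skip_x2; infer_instance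

-- ===== CLAIM (what is proved, stated in full; the proofs are below) =====
def Claim_equal_skip_x2 : Prop := ∀ (min : Int) (max : Int), Dom_skip_x2 min max → Spec_skip_x2 min max (skip_x2 min max)

-- ===== LEMMAS AND PROOFS =====

-- the loop, entered with i = 2^j and enough fuel, appends m + 2^k for k = j .. c-1
-- (c = bit size of the span) and exits with i = 2^(max j c)
lemma skip_x2_loop_spec (m mx : Int) :
    ∀ (fuel j : Nat) (acc : List Int),
      (mx - m).toNat.size ≤ j + fuel →
      skip_x2_loop fuel m mx (2 ^ j) acc =
        (acc ++ (List.range' j ((mx - m).toNat.size - j)).map (fun k => m + 2 ^ k),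
         2 ^ (Max.max j (mx - m).toNat.size)) := by
  intro fuel
  induction fuel with
  | zero =>
    intro j acc hle
    have hj : Max.max j (mx - m).toNat.size = j := by omega
    have hz : (mx - m).toNat.size - j = 0 := by omega
    simp [skip_x2_loop, hj, hz]
  | succ n ih =>
    intro j acc hle
    by_cases hc : (mx - m).toNat.size ≤ j
    · -- condition false: loop exits
      have h1 : (mx - m).toNat < 2 ^ (mx - m).toNat.size := Nat.lt_size_self _
      have h2 : (2 : ℕ) ^ (mx - m).toNat.size ≤ 2 ^ j :=
        Nat.pow_le_pow_right (by norm_num) (by omega)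
      have h3 : ((2 : ℕ) ^ j : Int) = (2 : Int) ^ j := by push_cast; ring
      have hno : ¬ (m + 2 ^ j ≤ mx) := by
        intro hcc
        have : (mx - m).toNat < 2 ^ j := by omega
        have : mx - m < ((2 : ℕ) ^ j : Int) := by omega
        omega
      have hj : Max.max j (mx - m).toNat.size = j := by omega
      have hz : (mx - m).toNat.size - j = 0 := by omega
      simp [skip_x2_loop, hno, hj, hz]
    · -- condition true: one iteration, then induction at j+1
      have hc' : j < (mx - m).toNat.size := by omega
      have h1 : (2 : ℕ) ^ j ≤ (mx - m).toNat := by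
        rcases Nat.lt_or_ge (mx - m).toNat (2 ^ j) with hn | hn
        · exact absurd (Nat.size_le.mpr hn) (by omega)
        · exact hn
      have h3 : ((2 : ℕ) ^ j : Int) = (2 : Int) ^ j := by push_cast; ring
      have h4 : 1 ≤ (2 : ℕ) ^ j := Nat.one_le_two_pow
      have hyes : m + 2 ^ j ≤ mx := by
        have : ((2 : ℕ) ^ j : Int) ≤ mx - m := by omega
        omega
      have hpow : (2 : Int) ^ j * 2 = 2 ^ (j + 1) := by ring
      rw [skip_x2_loop, if_pos hyes, hpow, ih (j + 1) (acc ++ [m + 2 ^ j]) (by omega)]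
      have hsub : (mx - m).toNat.size - j = ((mx - m).toNat.size - (j + 1)) + 1 := by omega
      have hmax : Max.max (j + 1) (mx - m).toNat.size = Max.max j (mx - m).toNat.size := by
        omega
      rw [hsub, List.range'_succ, hmax]
      simp

-- the actual call: i = 1 = 2^0 with fuel (mx-m).toNat + 1, which is always enough
lemma skip_x2_loop_one (m mx : Int) (acc : List Int) :
    skip_x2_loop ((mx - m).toNat + 1) m mx 1 acc =
      (acc ++ (List.range ((mx - m).toNat.size)).map (fun k => m + 2 ^ k),
       2 ^ (Max.max 0 (mx - m).toNat.size)) := by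
  have hfuel : (mx - m).toNat.size ≤ 0 + ((mx - m).toNat + 1) := by
    have h0 : (mx - m).toNat < 2 ^ ((mx - m).toNat + 1) :=
      lt_of_lt_of_le Nat.lt_two_pow_self (Nat.pow_le_pow_right (by norm_num) (Nat.le_succ _))
    have := Nat.size_le.mpr h0
    omega
  have h := skip_x2_loop_spec m mx ((mx - m).toNat + 1) 0 acc hfuel
  simpa [List.range_eq_range'] using h

-- at loop exit, i = 2^c and m + 2^c > mx, so A's final `append(max)` always fires
lemma exit_ne (m mx : Int) : m + 2 ^ (Max.max 0 (mx - m).toNat.size) ≠ mx := by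
  have h1 : (mx - m).toNat < 2 ^ (mx - m).toNat.size := Nat.lt_size_self _
  have hm : Max.max 0 (mx - m).toNat.size = (mx - m).toNat.size := by omega
  have h3 : ((2 : ℕ) ^ (mx - m).toNat.size : Int) = (2 : Int) ^ (mx - m).toNat.size := by
    push_cast; ring
  rw [hm]
  have : mx - m < ((2 : ℕ) ^ (mx - m).toNat.size : Int) := by omega
  omega

-- size of a positive number is size of its half plus one
lemma size_half_succ (n : Nat) (hn : 1 ≤ n) : n.size = (n / 2).size + 1 := by
  set s := (n / 2).size with hs
  have h1 : n / 2 < 2 ^ s := Nat.lt_size_self _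
  have h2 : n < 2 ^ (s + 1) := by
    have ha : n ≤ 2 * (n / 2) + 1 := by omega
    have hb : 2 ^ (s + 1) = 2 * 2 ^ s := by ring
    omega
  have hle : n.size ≤ s + 1 := Nat.size_le.mpr h2
  have hge : s + 1 ≤ n.size := by
    rcases Nat.eq_zero_or_pos s with h0 | h0
    · have h5 : n / 2 < 1 := by
        have hlt := Nat.lt_size_self (n / 2)
        rw [← hs, h0, pow_zero] at hlt
        exact hlt
      have hn1 : n = 1 := by omega
      simp [hn1, h0, Nat.size_one]
    · have h3 : 2 ^ (s - 1) ≤ n / 2 := by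
        rcases Nat.lt_or_ge (n / 2) (2 ^ (s - 1)) with hlt | hge'
        · exact absurd (Nat.size_le.mpr hlt) (by omega)
        · exact hge'
      have h4 : 2 ^ s ≤ n := by
        have : 2 ^ s = 2 * 2 ^ (s - 1) := by
          rw [← pow_succ']; congr 1; omega
        omega
      by_contra hcon
      have : n < 2 ^ s := Nat.lt_size_self n |>.trans_le
        (Nat.pow_le_pow_right (by norm_num) (by omega))
      omega
  omega

-- B's recursive halving generates exactly the powers 2^0 .. 2^(size-1)
lemma powersB_eq (d : Int) :
    powersB d = (List.range d.toNat.size).map (fun k => (2 : Int) ^ k) := by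
  by_cases h : d < 1
  · have : d.toNat = 0 := by omega
    rw [powersB]
    simp [h, this, Nat.size_zero]
  · have hpos : (0 : Int) < d := by omega
    have hdiv : PySem.Int.floordiv d 2 = d / 2 :=
      PySem.Int.floordiv_eq_ediv_of_pos (by omega : (0:Int) < 2)
    have hlt : (d / 2).toNat < d.toNat := by omega
    rw [powersB]
    simp only [h, dite_false]
    rw [hdiv, powersB_eq (d / 2)]
    have htoNat : (d / 2).toNat = d.toNat / 2 := by omega
    rw [htoNat, size_half_succ d.toNat (by omega), List.range_succ_eq_map]
    simp [List.map_map, Function.comp_def, pow_succ, mul_comm]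
termination_by d.toNat
decreasing_by omega

-- ===== VERDICT (by name: the statement is the Claim_ definition above) =====
theorem skip_x2_spec : Claim_equal_skip_x2 := by
  intro min max _
  unfold Spec_skip_x2 skip_x2 skip_x2_alt
  by_cases hmm : min = max
  · simp [hmm]
  · by_cases h1 : min = 1
    · simp only [h1, if_pos]
      rw [skip_x2_loop_one 0 max]
      simp only [if_pos (exit_ne 0 max), ne_eq]
      rw [powersB_eq, List.map_map]
      simp [Function.comp_def]
    · simp only [if_neg hmm, if_neg h1]
      rw [skip_x2_loop_one min max]
      simp only [if_pos (exit_ne min max), ne_eq]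
      rw [powersB_eq, List.map_map]
      simp [Function.comp_def]
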